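-- pv_equiv track=rewrite | github.com/JakubLem/zsk-informatyka | dodatkowe/lessons/lesson6/zad3.py | zad1
-- ===== SOURCE A (Python) =====
-- def zad1(liczby):
--     maxim = abs(liczby[0]-liczby[1])
--     minim = abs(liczby[0]-liczby[1])
--     for i in range(1, len(liczby)-1, 1):
--         if abs(liczby[i]-liczby[i+1]) > maxim:
--             maxim = abs(liczby[i]-liczby[i+1])
--         elif abs(liczby[i]-liczby[i+1]) < minim:
--             minim = abs(liczby[i]-liczby[i+1])
--     return {"minim": minim, "maxim": maxim}
-- ===== SOURCE B (Python) =====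
-- def zad1(liczby):
--     first = abs(liczby[0] - liczby[1])
--     diffs = [first] + [abs(a - b) for a, b in zip(liczby[1:], liczby[2:])]
--     return {"minim": min(diffs), "maxim": max(diffs)}
-- ===== Notes on version B (the rewrite author's own statement) =====
-- stated objective: simpler
-- what changed: Replaces A's index-based running min/max loop with building the list of adjacent absolute differences once (zip comprehension) and taking min() and max() of it.
import Mathlib
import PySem

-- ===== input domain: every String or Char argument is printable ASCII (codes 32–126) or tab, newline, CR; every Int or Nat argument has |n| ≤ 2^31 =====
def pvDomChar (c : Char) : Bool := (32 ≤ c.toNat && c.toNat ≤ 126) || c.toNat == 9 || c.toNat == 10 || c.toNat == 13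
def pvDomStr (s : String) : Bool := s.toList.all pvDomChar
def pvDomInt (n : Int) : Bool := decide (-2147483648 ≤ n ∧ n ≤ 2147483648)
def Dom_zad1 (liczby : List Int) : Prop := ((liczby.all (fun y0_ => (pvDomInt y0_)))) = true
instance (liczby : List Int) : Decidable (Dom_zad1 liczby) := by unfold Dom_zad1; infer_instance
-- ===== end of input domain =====

-- B builds the list of adjacent absolute differences once and takes min/max of it,
-- replacing A's index-based running min/max loop (objective: simpler decomposition).


-- ===== PORT A =====
-- literal transliteration of A: seed min/max with |l[0]-l[1]|, then for i in
-- range(1, len(l)-1) update the running pair (pyGetD is exact on the in-range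
-- indices Pre_ guarantees).
def zad1 (liczby : List Int) : List (String × Int) :=
  let maxim0 : Int := |PySem.List.pyGetD liczby 0 0 - PySem.List.pyGetD liczby 1 0|
  let minim0 : Int := |PySem.List.pyGetD liczby 0 0 - PySem.List.pyGetD liczby 1 0|
  let mm :=
    (PySem.List.pyRange 1 ((liczby.length : Int) - 1) 1).foldl
      (fun (mm : Int × Int) i =>
        if |PySem.List.pyGetD liczby i 0 - PySem.List.pyGetD liczby (i+1) 0| > mm.2 then
          (mm.1, |PySem.List.pyGetD liczby i 0 - PySem.List.pyGetD liczby (i+1) 0|)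
        else if |PySem.List.pyGetD liczby i 0 - PySem.List.pyGetD liczby (i+1) 0| < mm.1 then
          (|PySem.List.pyGetD liczby i 0 - PySem.List.pyGetD liczby (i+1) 0|, mm.2)
        else mm)
      (minim0, maxim0)
  [("minim", mm.1), ("maxim", mm.2)]

-- ===== PORT B =====
-- literal transliteration of B: first diff, then the zip comprehension, then min/max.
def zad1_alt (liczby : List Int) : List (String × Int) :=
  let first : Int := |PySem.List.pyGetD liczby 0 0 - PySem.List.pyGetD liczby 1 0|
  let diffs : List Int :=
    [first] ++ ((liczby.drop 1).zip (liczby.drop 2)).map (fun p => |p.1 - p.2|)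
  [("minim", (PySem.List.min? diffs (fun x => x)).getD 0),
   ("maxim", (PySem.List.max? diffs (fun x => x)).getD 0)]

-- ===== PRECONDITION & SPEC =====
-- Both programs raise on lists shorter than two elements (A when indexing, B when reducing), so those inputs are outside Pre_.
def Pre_zad1 (liczby : List Int) : Prop := 2 ≤ liczby.length
instance (liczby : List Int) : Decidable (Pre_zad1 liczby) := by unfold Pre_zad1; infer_instance
def pvWitness_zad1 : List Int := [3, -1, 4]
def Spec_zad1 (liczby : List Int) (out : List (String × Int)) : Prop := out = zad1_alt liczby
instance (liczby : List Int) (out : List (String × Int)) : Decidable (Spec_zad1 liczby out) := by unfold Spec_zad1; infer_instance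

-- ===== CLAIM (what is proved, stated in full; the proofs are below) =====
def Claim_equal_zad1 : Prop := ∀ (liczby : List Int), Dom_zad1 liczby → Pre_zad1 liczby → Spec_zad1 liczby (zad1 liczby)

-- ===== LEMMAS AND PROOFS =====

-- A's branching update preserves mn ≤ mx and equals componentwise (min, max)
lemma step_eq_minmax (ds : List Int) : ∀ (mn mx : Int), mn ≤ mx →
    ds.foldl (fun (mm : Int × Int) d =>
        if d > mm.2 then (mm.1, d)
        else if d < mm.1 then (d, mm.2) else mm) (mn, mx)
      = (ds.foldl min mn, ds.foldl max mx) := by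
  induction ds with
  | nil => intro mn mx h; simp
  | cons d t ih =>
    intro mn mx h
    simp only [List.foldl_cons]
    split_ifs with h1 h2
    · rw [ih mn d (by omega), show min mn d = mn from by omega,
          show max mx d = d from by omega]
    · rw [ih d mx (by omega), show min mn d = d from by omega,
          show max mx d = mx from by omega]
    · rw [ih mn mx h, show min mn d = mn from by omega,
          show max mx d = mx from by omega]

-- the tail of the adjacent-diff list of l is the adjacent-diff list of l.tail
lemma tail_zip_diffs (l : List Int) :
    (List.map (fun p : Int × Int => |p.1 - p.2|) (l.zip (List.drop 1 l))).tail
      = List.map (fun p : Int × Int => |p.1 - p.2|) (l.tail.zip (List.drop 2 l)) := by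
  match l with
  | [] => rfl
  | [_] => rfl
  | _ :: _ :: _ => rfl

theorem zad1_spec : Claim_equal_zad1 := by
  intro l _ hpre
  unfold Pre_zad1 at hpre
  unfold Spec_zad1 zad1 zad1_alt
  simp only []
  -- abbreviations
  set D : List Int := (l.zip (l.drop 1)).map (fun p => |p.1 - p.2|) with hD
  have hDlen : D.length = l.length - 1 := by
    simp only [hD, List.length_map, List.length_zip, List.length_drop, min_def]
    split <;> omega
  have hget : ∀ i : Int, 0 ≤ i → i < (l.length : Int) - 1 →
      |PySem.List.pyGetD l i 0 - PySem.List.pyGetD l (i+1) 0| = PySem.List.pyGetD D i 0 := by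
    intro i h0 h1
    have hi : i.toNat + 1 < l.length := by omega
    rw [PySem.List.pyGetD_eq_getElem l 0 h0 (by omega),
        PySem.List.pyGetD_eq_getElem l 0 (by omega : (0:Int) ≤ i+1) (by omega),
        PySem.List.pyGetD_eq_getElem D 0 h0 (by omega)]
    simp only [hD, List.getElem_map, List.getElem_zip, List.getElem_drop,
      show (i+1).toNat = 1 + i.toNat from by omega]
  have hd0 : |PySem.List.pyGetD l 0 0 - PySem.List.pyGetD l 1 0| = PySem.List.pyGetD D 0 0 :=
    hget 0 le_rfl (by omega)
  -- rewrite A's fold body to read from D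
  have hcongr :
      (PySem.List.pyRange 1 ((l.length : Int) - 1) 1).foldl
        (fun (mm : Int × Int) i =>
          if |PySem.List.pyGetD l i 0 - PySem.List.pyGetD l (i+1) 0| > mm.2 then
            (mm.1, |PySem.List.pyGetD l i 0 - PySem.List.pyGetD l (i+1) 0|)
          else if |PySem.List.pyGetD l i 0 - PySem.List.pyGetD l (i+1) 0| < mm.1 then
            (|PySem.List.pyGetD l i 0 - PySem.List.pyGetD l (i+1) 0|, mm.2)
          else mm)
        (PySem.List.pyGetD D 0 0, PySem.List.pyGetD D 0 0)
      = (PySem.List.pyRange 1 ((l.length : Int) - 1) 1).foldl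
        (fun (mm : Int × Int) i =>
          if PySem.List.pyGetD D i 0 > mm.2 then (mm.1, PySem.List.pyGetD D i 0)
          else if PySem.List.pyGetD D i 0 < mm.1 then (PySem.List.pyGetD D i 0, mm.2)
          else mm)
        (PySem.List.pyGetD D 0 0, PySem.List.pyGetD D 0 0) := by
    apply PySem.List.foldl_congr_mem
    intro acc x hx
    rw [PySem.List.mem_pyRange_one] at hx
    rw [hget x (by omega) hx.2]
  -- turn the pyRange fold over D's entries into a fold over D.drop 1
  have hbound : ((l.length : Int) - 1) = (D.length : Int) := by
    rw [hDlen]; omega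
  have hfold :
      (PySem.List.pyRange 1 ((l.length : Int) - 1) 1).foldl
        (fun (mm : Int × Int) i =>
          if PySem.List.pyGetD D i 0 > mm.2 then (mm.1, PySem.List.pyGetD D i 0)
          else if PySem.List.pyGetD D i 0 < mm.1 then (PySem.List.pyGetD D i 0, mm.2)
          else mm)
        (PySem.List.pyGetD D 0 0, PySem.List.pyGetD D 0 0)
      = (D.drop 1).foldl
        (fun (mm : Int × Int) d =>
          if d > mm.2 then (mm.1, d) else if d < mm.1 then (d, mm.2) else mm)
        (PySem.List.pyGetD D 0 0, PySem.List.pyGetD D 0 0) := by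
    rw [hbound]
    exact PySem.List.foldl_pyRange_pyGetD' D 0
      (fun (mm : Int × Int) d =>
        if d > mm.2 then (mm.1, d) else if d < mm.1 then (d, mm.2) else mm) _
      (by omega : (0:Int) ≤ 1)
  -- D is nonempty with head = pyGetD D 0 0
  obtain ⟨d0, D1, hcons⟩ : ∃ d0 D1, D = d0 :: D1 := by
    cases hE : D with
    | nil => exfalso; rw [hE] at hDlen; simp at hDlen; omega
    | cons a t => exact ⟨a, t, rfl⟩
  have hhead : PySem.List.pyGetD D 0 0 = d0 := by
    rw [hcons]; simp [PySem.List.pyGetD]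
  have hD1 : D1 = List.map (fun p : Int × Int => |p.1 - p.2|) (l.tail.zip (List.drop 2 l)) := by
    have h1 : D.tail = D1 := by rw [hcons]; rfl
    rw [hD, tail_zip_diffs] at h1
    exact h1.symm
  rw [hd0, hcongr, hfold, hhead, hcons]
  simp only [List.drop_one, List.tail_cons]
  rw [step_eq_minmax D1 d0 d0 le_rfl]
  simp only [List.singleton_append, ← hD1]
  rw [PySem.List.min?_id_cons, PySem.List.max?_id_cons]
  rfl
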